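-- pv_equiv track=rewrite | github.com/acu192/advent-of-code-2019 | 44/s_part1_redone.py | get_card
-- ===== SOURCE A (Python) =====
-- def egcd(a, b):
--     # See: https://discuss.codechef.com/t/a-tutorial-on-the-extended-euclids-algorithm/2923
--     if a == 0:
--         return (b, 0, 1)
--     else:
--         g, y, x = egcd(b % a, a)
--         return (g, x - (b // a) * y, y)
--
-- modinv_cache = {}
--
-- def modinv(a, m):
--     # See: https://discuss.codechef.com/t/a-tutorial-on-the-extended-euclids-algorithm/2923
--     if (a, m) in modinv_cache:
--         return modinv_cache[(a, m)]
--     g, x, y = egcd(a, m)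
--     if g != 1:
--         solution = None  # modular inverse does not exist
--     else:
--         solution = x % m
--     modinv_cache[(a, m)] = solution
--     return solution
--
-- def get_card(interst, lenth, shuffle_steps):
--     for step, n in reversed(shuffle_steps):
--         if step == 'cut':
--             if n < 0:
--                 n = lenth + n
--             n = lenth - n
--             interst = (lenth + interst - n) % lenth
--
--         elif step == 'reverse':
--             interst = lenth - interst - 1
--
--         elif step == 'inc':
--             inv = modinv(n, lenth)
--             interst = (interst * inv) % lenth
--
--     return interst
-- ===== SOURCE B (Python) =====
-- def _modinv(n, m):
--     # iterative extended Euclid; valid inverse when gcd(n, m) == 1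
--     r0, r1 = n % m, m
--     s0, s1 = 1, 0
--     while r1:
--         q = r0 // r1
--         r0, r1 = r1, r0 - q * r1
--         s0, s1 = s1, s0 - q * s1
--     return s0 % m
--
-- def get_card(interst, lenth, shuffle_steps):
--     # compose the shuffle, backwards, into a single affine map x -> (a*x + b) % lenth;
--     # ab is None while no shuffle operation has been seen (identity: the card stays put)
--     ab = None
--     for step, n in reversed(shuffle_steps):
--         if step == 'cut':
--             cd = (1, n)
--         elif step == 'reverse':
--             cd = (-1, lenth - 1)
--         elif step == 'inc':
--             cd = (_modinv(n, lenth), 0)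
--         else:
--             continue
--         a, b = ab if ab is not None else (1, 0)
--         c, d = cd
--         ab = ((c * a) % lenth, (c * b + d) % lenth)
--     if ab is None:
--         return interst
--     a, b = ab
--     return (a * interst + b) % lenth
-- ===== Notes on version B (the rewrite author's own statement) =====
-- stated objective: alternative
-- what changed: B folds the reversed shuffle steps into a single composed affine map (a,b) modulo lenth (computing the modular inverse with an iterative extended Euclid) and applies it to interst once at the end, instead of A's per-step transformation of the position with a recursive egcd.
-- intended difference: On an out-of-range starting position combined with a shuffle list containing no 'cut'/'inc' step, A returns the position unreduced (possibly negative or >= lenth) because no '%' is ever applied, while B returns it reduced modulo lenth, the in-range deck position that is the intended value. — e.g. on get_card(10, 3, [("reverse", 0)]): A returns -8, B returns 1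
-- outside the precondition, e.g. on get_card(8, -4, [('reverse', 3)]): A returns -13, B returns -1; on get_card(5, 0, [('reverse', 2)]): A returns -6, B raises ZeroDivisionError
import Mathlib
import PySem

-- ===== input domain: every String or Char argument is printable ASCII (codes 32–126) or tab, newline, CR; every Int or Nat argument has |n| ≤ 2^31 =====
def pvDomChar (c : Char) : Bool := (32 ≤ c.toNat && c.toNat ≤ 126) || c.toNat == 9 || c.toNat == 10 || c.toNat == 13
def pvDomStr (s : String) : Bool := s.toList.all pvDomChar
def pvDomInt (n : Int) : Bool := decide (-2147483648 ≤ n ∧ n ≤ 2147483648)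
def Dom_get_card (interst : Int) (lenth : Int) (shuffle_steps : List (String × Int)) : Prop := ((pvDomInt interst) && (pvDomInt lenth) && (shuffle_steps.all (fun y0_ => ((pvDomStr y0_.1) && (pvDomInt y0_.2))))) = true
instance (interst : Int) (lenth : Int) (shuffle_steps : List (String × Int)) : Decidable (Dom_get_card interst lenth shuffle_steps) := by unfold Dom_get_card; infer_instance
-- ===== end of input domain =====

-- B composes the reversed shuffle steps into one affine map (a,b) mod lenth (with an iterative
-- extended-Euclid modular inverse) and applies it once, instead of transforming the position step
-- by step with a recursive egcd; objective: alternative decomposition (similar cost).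


-- shared termination fact: a Python '%' by a nonzero divisor shrinks the absolute value
theorem pv_mod_natAbs_lt (b a : Int) (h : a ≠ 0) : (PySem.Int.mod b a).natAbs < a.natAbs := by
  rcases lt_or_gt_of_ne h with hneg | hpos
  · have h1 := PySem.Int.mod_neg_bounds (a := b) (b := a) hneg
    omega
  · have h1 := PySem.Int.mod_nonneg (a := b) (b := a) hpos
    have h2 := PySem.Int.mod_lt (a := b) (b := a) hpos
    omega

-- ===== PORT A =====
-- A's recursive extended Euclid (egcd)
def egcdA (a b : Int) : Int × Int × Int :=
  if a = 0 then (b, 0, 1)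
  else
    let r := egcdA (PySem.Int.mod b a) a  -- g, y, x = egcd(b % a, a)
    (r.1, r.2.2 - PySem.Int.floordiv b a * r.2.1, r.2.1)
termination_by a.natAbs
decreasing_by exact pv_mod_natAbs_lt b a (by assumption)

-- A's modinv; the memoisation cache is pure caching and does not affect the value, so it is dropped.
-- 'none' is Python's None; A raises TypeError when it is used, those inputs are outside Pre_.
def modinvA (a m : Int) : Option Int :=
  let r := egcdA a m
  if r.1 ≠ 1 then none else some (PySem.Int.mod r.2.1 m)

-- one iteration of A's loop body
def stepA (lenth : Int) (interst : Int) (p : String × Int) : Int :=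
  if p.1 = "cut" then
    let n1 := if p.2 < 0 then lenth + p.2 else p.2
    let n2 := lenth - n1
    PySem.Int.mod (lenth + interst - n2) lenth
  else if p.1 = "reverse" then lenth - interst - 1
  else if p.1 = "inc" then
    PySem.Int.mod (interst * (modinvA p.2 lenth).getD 0) lenth
  else interst

def get_card (interst : Int) (lenth : Int) (shuffle_steps : List (String × Int)) : Int :=
  shuffle_steps.reverse.foldl (stepA lenth) interst

-- ===== PORT B =====
-- B's iterative extended-Euclid loop: state (r0, r1, s0, s1)
def eloopB (r0 r1 s0 s1 : Int) : Int × Int :=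
  if r1 = 0 then (r0, s0)
  else
    let q := PySem.Int.floordiv r0 r1
    eloopB r1 (r0 - q * r1) s1 (s0 - q * s1)
termination_by r1.natAbs
decreasing_by
  have h := pv_mod_natAbs_lt r0 r1 (by assumption)
  have hm := PySem.Int.floordiv_mul_add_mod r0 r1
  have : r0 - PySem.Int.floordiv r0 r1 * r1 = PySem.Int.mod r0 r1 := by omega
  simpa [this] using h

def modinvB (n m : Int) : Int :=
  let p := eloopB (PySem.Int.mod n m) m 1 0
  PySem.Int.mod p.2 m

-- one iteration of B's loop body: fold the step's inverse affine map cd = (c, d) into ab = (a, b);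
-- ab = none is Python's 'ab is None' (no shuffle operation seen yet), 'continue' keeps ab
def stepAffine (lenth : Int) (ab : Option (Int × Int)) (p : String × Int) : Option (Int × Int) :=
  let cd : Option (Int × Int) :=
    if p.1 = "cut" then some (1, p.2)
    else if p.1 = "reverse" then some (-1, lenth - 1)
    else if p.1 = "inc" then some (modinvB p.2 lenth, 0)
    else none
  match cd with
  | none => ab
  | some cd0 =>
    let ab0 := ab.getD (1, 0)
    some (PySem.Int.mod (cd0.1 * ab0.1) lenth, PySem.Int.mod (cd0.1 * ab0.2 + cd0.2) lenth)

def get_card_alt (interst : Int) (lenth : Int) (shuffle_steps : List (String × Int)) : Int :=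
  match shuffle_steps.reverse.foldl (stepAffine lenth) none with
  | none => interst
  | some ab => PySem.Int.mod (ab.1 * interst + ab.2) lenth

-- ===== PRECONDITION & SPEC =====
-- Pre_ restricts to a positive deck size lenth and 'inc' steps with non-negative n coprime to
-- lenth: on other 'inc' steps A raises TypeError (modinv returns None), on lenth = 0 it raises
-- ZeroDivisionError, and for lenth < 0 Python's negative-divisor '%' makes A's intermediate
-- positions leave any fixed residue range, a corner no deck shuffle specifies.
def Pre_get_card (interst : Int) (lenth : Int) (shuffle_steps : List (String × Int)) : Prop :=
  0 < lenth ∧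
  (∀ p ∈ shuffle_steps, p.1 = "inc" → 0 ≤ p.2 ∧ Int.gcd p.2 lenth = 1)

instance (interst : Int) (lenth : Int) (shuffle_steps : List (String × Int)) : Decidable (Pre_get_card interst lenth shuffle_steps) := by unfold Pre_get_card; infer_instance

def pvWitness_get_card : Int × Int × (List (String × Int)) := (3, 10, [("cut", 3), ("inc", 7), ("reverse", 0)])

-- On an out-of-range starting position with a shuffle list containing a 'reverse' but no
-- 'cut'/'inc' step, A returns the reflected position unreduced (possibly negative or ≥ lenth)
-- because no '%' is ever applied, while B reduces modulo lenth and returns the in-range deck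
-- position, which is the intended value.
def D_get_card (interst : Int) (lenth : Int) (shuffle_steps : List (String × Int)) : Prop :=
  ¬ (0 ≤ interst ∧ interst < lenth) ∧ (∀ p ∈ shuffle_steps, p.1 ≠ "cut" ∧ p.1 ≠ "inc") ∧
    (∃ p ∈ shuffle_steps, p.1 = "reverse")

instance (interst : Int) (lenth : Int) (shuffle_steps : List (String × Int)) : Decidable (D_get_card interst lenth shuffle_steps) := by unfold D_get_card; infer_instance

def Spec_get_card (interst : Int) (lenth : Int) (shuffle_steps : List (String × Int)) (out : Int) : Prop := ¬ D_get_card interst lenth shuffle_steps → out = get_card_alt interst lenth shuffle_steps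
instance (interst : Int) (lenth : Int) (shuffle_steps : List (String × Int)) (out : Int) : Decidable (Spec_get_card interst lenth shuffle_steps out) := by unfold Spec_get_card; infer_instance

def pvDiffWitness_get_card : Int × Int × (List (String × Int)) := (10, 3, [("reverse", 0)])
def pvDiffWitnessOut_get_card : Int × Int := (-8, 1)

-- ===== CLAIM (what is proved, stated in full; the proofs are below) =====
def Claim_unchanged_get_card : Prop := ∀ (interst : Int) (lenth : Int) (shuffle_steps : List (String × Int)), Dom_get_card interst lenth shuffle_steps → Pre_get_card interst lenth shuffle_steps → Spec_get_card interst lenth shuffle_steps (get_card interst lenth shuffle_steps)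
def Claim_changed_get_card : Prop := Dom_get_card (pvDiffWitness_get_card.1) (pvDiffWitness_get_card.2.1) (pvDiffWitness_get_card.2.2) ∧ Pre_get_card (pvDiffWitness_get_card.1) (pvDiffWitness_get_card.2.1) (pvDiffWitness_get_card.2.2) ∧ D_get_card (pvDiffWitness_get_card.1) (pvDiffWitness_get_card.2.1) (pvDiffWitness_get_card.2.2) ∧ get_card (pvDiffWitness_get_card.1) (pvDiffWitness_get_card.2.1) (pvDiffWitness_get_card.2.2) = pvDiffWitnessOut_get_card.1 ∧ get_card_alt (pvDiffWitness_get_card.1) (pvDiffWitness_get_card.2.1) (pvDiffWitness_get_card.2.2) = pvDiffWitnessOut_get_card.2 ∧ pvDiffWitnessOut_get_card.1 ≠ pvDiffWitnessOut_get_card.2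
def Claim_exact_get_card : Prop := ∀ (interst : Int) (lenth : Int) (shuffle_steps : List (String × Int)), Dom_get_card interst lenth shuffle_steps → Pre_get_card interst lenth shuffle_steps → D_get_card interst lenth shuffle_steps → get_card interst lenth shuffle_steps ≠ get_card_alt interst lenth shuffle_steps

-- ===== LEMMAS AND PROOFS =====

-- Python '%' by a positive modulus, seen as a congruence
theorem pv_mod_modeq (a L : Int) (hL : 0 < L) : PySem.Int.mod a L ≡ a [ZMOD L] := by
  rw [PySem.Int.mod_eq_emod_of_pos hL]
  exact Int.emod_emod_of_dvd a dvd_rfl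

theorem pv_L_zero (L : Int) : L ≡ 0 [ZMOD L] := Int.modEq_zero_iff_dvd.mpr dvd_rfl

-- Bezout identity for A's egcd
theorem egcdA_bezout (a b : Int) :
    (egcdA a b).2.1 * a + (egcdA a b).2.2 * b = (egcdA a b).1 := by
  fun_induction egcdA a b with
  | case1 b => ring
  | case2 a b h r ih =>
    have hm := PySem.Int.floordiv_mul_add_mod b a
    set q := PySem.Int.floordiv b a with hq
    show ((egcdA (PySem.Int.mod b a) a).2.2 - q * (egcdA (PySem.Int.mod b a) a).2.1) * a
        + (egcdA (PySem.Int.mod b a) a).2.1 * b = (egcdA (PySem.Int.mod b a) a).1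
    have hmod : PySem.Int.mod b a = b - q * a := by omega
    rw [hmod] at ih ⊢
    linear_combination ih

-- A's egcd computes the gcd on non-negative arguments
theorem egcdA_gcd (a b : Int) : 0 ≤ a → 0 ≤ b → (egcdA a b).1 = (Int.gcd a b : Int) := by
  fun_induction egcdA a b with
  | case1 b =>
    intro _ hb
    simp [Int.natAbs_of_nonneg hb]
  | case2 a b h r ih =>
    intro ha hb
    have hpos : 0 < a := lt_of_le_of_ne ha (Ne.symm h)
    have hmod : PySem.Int.mod b a = b % a := PySem.Int.mod_eq_emod_of_pos hpos
    show (egcdA (PySem.Int.mod b a) a).1 = (Int.gcd a b : Int)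
    rw [ih (by rw [hmod]; exact Int.emod_nonneg b (by omega)) ha, hmod]
    rw [Int.gcd_comm a b, ← Int.gcd_emod b a]

-- B's loop keeps the congruence s*n ≡ r (mod m)
theorem eloopB_cong (n m : Int) (r0 r1 s0 s1 : Int) :
    s0 * n ≡ r0 [ZMOD m] → s1 * n ≡ r1 [ZMOD m] →
    (eloopB r0 r1 s0 s1).2 * n ≡ (eloopB r0 r1 s0 s1).1 [ZMOD m] := by
  fun_induction eloopB r0 r1 s0 s1 with
  | case1 r0 s0 => intro h0 _; exact h0
  | case2 r0 r1 s0 s1 h q ih =>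
    intro h0 h1
    refine ih h1 ?_
    have hr : (s0 - q * s1) * n = s0 * n - q * (s1 * n) := by ring
    rw [hr]
    exact h0.sub (h1.mul_left q)

-- B's loop computes the gcd on non-negative arguments
theorem eloopB_gcd (r0 r1 s0 s1 : Int) :
    0 ≤ r0 → 0 ≤ r1 → (eloopB r0 r1 s0 s1).1 = (Int.gcd r0 r1 : Int) := by
  fun_induction eloopB r0 r1 s0 s1 with
  | case1 r0 s0 =>
    intro h0 _
    simp [Int.natAbs_of_nonneg h0]
  | case2 r0 r1 s0 s1 h q ih =>
    intro h0 h1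
    have hpos : 0 < r1 := lt_of_le_of_ne h1 (Ne.symm h)
    have hm := PySem.Int.floordiv_mul_add_mod r0 r1
    have hmod : r0 - q * r1 = r0 % r1 := by
      have := PySem.Int.mod_eq_emod_of_pos (a := r0) hpos
      simp only [q]; omega
    rw [ih h1 (by rw [hmod]; exact Int.emod_nonneg r0 (by omega))]
    rw [hmod, Int.gcd_comm r1 (r0 % r1), Int.gcd_emod r0 r1, Int.gcd_comm r0 r1]

-- both modular inverses agree when the inverse exists
theorem modinv_eq (n m : Int) (hn : 0 ≤ n) (hm : 0 < m) (hg : Int.gcd n m = 1) :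
    modinvA n m = some (modinvB n m) := by
  have hgA : (egcdA n m).1 = 1 := by
    rw [egcdA_gcd n m hn (le_of_lt hm), hg]; rfl
  have huA : PySem.Int.mod (egcdA n m).2.1 m * n ≡ 1 [ZMOD m] := by
    have hb := egcdA_bezout n m
    rw [hgA] at hb
    have hx : (egcdA n m).2.1 * n ≡ 1 [ZMOD m] :=
      Int.modEq_iff_dvd.mpr ⟨(egcdA n m).2.2, by linarith⟩
    exact ((pv_mod_modeq (egcdA n m).2.1 m hm).mul_right n).trans hx
  have huB : modinvB n m * n ≡ 1 [ZMOD m] := by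
    have hc := eloopB_cong n m (PySem.Int.mod n m) m 1 0
      (by simpa using (pv_mod_modeq n m hm).symm)
      (by simpa using (pv_L_zero m).symm)
    have hgB : (eloopB (PySem.Int.mod n m) m 1 0).1 = 1 := by
      rw [eloopB_gcd _ _ _ _ (PySem.Int.mod_nonneg _ hm) (le_of_lt hm)]
      rw [PySem.Int.mod_eq_emod_of_pos hm, Int.gcd_emod n m, hg]; rfl
    rw [hgB] at hc
    exact ((pv_mod_modeq _ m hm).mul_right n).trans hc
  set uA := PySem.Int.mod (egcdA n m).2.1 m with huAdef
  set uB := modinvB n m with huBdef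
  have heq : uA = uB := by
    have hmeq : uA ≡ uB [ZMOD m] := by
      calc uA = uA * 1 := by ring
        _ ≡ uA * (uB * n) [ZMOD m] := (huB.mul_left uA).symm
        _ = uB * (uA * n) := by ring
        _ ≡ uB * 1 [ZMOD m] := huA.mul_left uB
        _ = uB := by ring
    have h1 : uA % m = uB % m := hmeq
    have h2 : uA % m = uA := Int.emod_eq_of_lt (PySem.Int.mod_nonneg _ hm) (by
      simpa [huAdef] using PySem.Int.mod_lt (egcdA n m).2.1 hm)
    have h3 : uB % m = uB := by
      have huB2 : uB = PySem.Int.mod (eloopB (PySem.Int.mod n m) m 1 0).2 m := rfl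
      rw [huB2]
      exact Int.emod_eq_of_lt (PySem.Int.mod_nonneg _ hm) (PySem.Int.mod_lt _ hm)
    omega
  unfold modinvA
  simp only [hgA, ne_eq, not_true_eq_false, ite_false]
  exact congrArg some heq

-- A's accumulator stays in [0, lenth) once in range or once a cut/inc step occurs
theorem foldA_range (L : Int) (rs : List (String × Int)) (hL : 0 < L) : ∀ (x : Int),
    ((0 ≤ x ∧ x < L) ∨ ∃ p ∈ rs, p.1 = "cut" ∨ p.1 = "inc") →
    0 ≤ rs.foldl (stepA L) x ∧ rs.foldl (stepA L) x < L := by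
  induction rs with
  | nil =>
    intro x h
    rcases h with h | ⟨p, hp, _⟩
    · simpa using h
    · simp at hp
  | cons p t ih =>
    intro x h
    rw [List.foldl_cons]
    by_cases hcut : p.1 = "cut"
    · refine ih _ (Or.inl ?_)
      simp only [stepA, if_pos hcut]
      exact ⟨PySem.Int.mod_nonneg _ hL, PySem.Int.mod_lt _ hL⟩
    · by_cases hinc : p.1 = "inc"
      · refine ih _ (Or.inl ?_)
        have hrev : ¬ p.1 = "reverse" := by rw [hinc]; decide
        simp only [stepA, if_neg hcut, if_neg hrev, if_pos hinc]
        exact ⟨PySem.Int.mod_nonneg _ hL, PySem.Int.mod_lt _ hL⟩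
      · have hnext : ∀ y : Int, stepA L y p = (if p.1 = "reverse" then L - y - 1 else y) := by
          intro y; simp [stepA, hcut, hinc]
        rcases h with hx | ⟨q, hq, hq2⟩
        · refine ih _ (Or.inl ?_)
          rw [hnext]
          split_ifs
          · omega
          · exact hx
        · rcases List.mem_cons.mp hq with rfl | hqt
          · rcases hq2 with h1 | h1
            · exact absurd h1 hcut
            · exact absurd h1 hinc
          · exact ih _ (Or.inr ⟨q, hqt, hq2⟩)

-- the accumulator relation: while B has seen no shuffle operation A's position is still the
-- original; afterwards B's affine coefficients track A's position as a congruence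
def RelAff (L i x : Int) (ab : Option (Int × Int)) : Prop :=
  match ab with
  | none => x = i
  | some ab0 => x ≡ ab0.1 * i + ab0.2 [ZMOD L]

theorem relAff_getD {L i x : Int} {ab : Option (Int × Int)}
    (h : RelAff L i x ab) : x ≡ (ab.getD (1, 0)).1 * i + (ab.getD (1, 0)).2 [ZMOD L] := by
  cases ab with
  | none => simp [RelAff] at h; simp [h]
  | some ab0 => simpa [RelAff] using h

-- one step preserves the relation
theorem step_rel (L i : Int) (hL : 0 < L) (p : String × Int)
    (hp : p.1 = "inc" → 0 ≤ p.2 ∧ Int.gcd p.2 L = 1) :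
    ∀ (x : Int) (ab : Option (Int × Int)), RelAff L i x ab →
      RelAff L i (stepA L x p) (stepAffine L ab p) := by
  intro x ab h
  have hab := relAff_getD h
  set a := (ab.getD (1, 0)).1 with ha
  set b := (ab.getD (1, 0)).2 with hb
  by_cases hcut : p.1 = "cut"
  · simp only [stepA, stepAffine, if_pos hcut, RelAff]
    have hn1 : (if p.2 < 0 then L + p.2 else p.2) ≡ p.2 [ZMOD L] := by
      split_ifs
      · show L + p.2 ≡ p.2 [ZMOD L]
        simp [Int.ModEq]
      · rfl
    calc PySem.Int.mod (L + x - (L - if p.2 < 0 then L + p.2 else p.2)) L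
        ≡ L + x - (L - if p.2 < 0 then L + p.2 else p.2) [ZMOD L] := pv_mod_modeq _ L hL
      _ = x + (if p.2 < 0 then L + p.2 else p.2) := by ring
      _ ≡ (a * i + b) + p.2 [ZMOD L] := hab.add hn1
      _ = (1 * a) * i + (1 * b + p.2) := by ring
      _ ≡ PySem.Int.mod (1 * a) L * i + PySem.Int.mod (1 * b + p.2) L [ZMOD L] :=
          (((pv_mod_modeq (1 * a) L hL).mul_right i).add (pv_mod_modeq (1 * b + p.2) L hL)).symm
  · by_cases hrev : p.1 = "reverse"
    · simp only [stepA, stepAffine, if_neg hcut, if_pos hrev, RelAff]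
      calc L - x - 1
          ≡ 0 - x - 1 [ZMOD L] := ((pv_L_zero L).sub_right x).sub_right 1
        _ = -x - 1 := by ring
        _ ≡ -(a * i + b) - 1 [ZMOD L] := (hab.neg).sub_right 1
        _ = (-1 * a) * i + (-1 * b + (L - 1)) + (0 - L) := by ring
        _ ≡ (-1 * a) * i + (-1 * b + (L - 1)) + (L - L) [ZMOD L] :=
            Int.ModEq.add_left _ ((pv_L_zero L).symm.sub_right L)
        _ = (-1 * a) * i + (-1 * b + (L - 1)) := by ring
        _ ≡ PySem.Int.mod (-1 * a) L * i + PySem.Int.mod (-1 * b + (L - 1)) L [ZMOD L] :=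
            (((pv_mod_modeq _ L hL).mul_right i).add (pv_mod_modeq _ L hL)).symm
    · by_cases hi : p.1 = "inc"
      · simp only [stepA, stepAffine, if_neg hcut, if_neg hrev, if_pos hi, RelAff]
        obtain ⟨hn, hg⟩ := hp hi
        rw [modinv_eq p.2 L hn hL hg]
        set u := modinvB p.2 L with hu
        calc PySem.Int.mod (x * (some u).getD 0) L
            ≡ x * u [ZMOD L] := pv_mod_modeq _ L hL
          _ ≡ (a * i + b) * u [ZMOD L] := hab.mul_right u
          _ = (u * a) * i + (u * b + 0) := by ring
          _ ≡ PySem.Int.mod (u * a) L * i + PySem.Int.mod (u * b + 0) L [ZMOD L] :=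
              (((pv_mod_modeq _ L hL).mul_right i).add (pv_mod_modeq _ L hL)).symm
      · simpa only [stepA, stepAffine, if_neg hcut, if_neg hrev, if_neg hi] using h

-- the whole fold preserves the relation
theorem fold_rel (L i : Int) (rs : List (String × Int)) (hL : 0 < L)
    (hinc : ∀ p ∈ rs, p.1 = "inc" → 0 ≤ p.2 ∧ Int.gcd p.2 L = 1) :
    ∀ (x : Int) (ab : Option (Int × Int)), RelAff L i x ab →
      RelAff L i (rs.foldl (stepA L) x) (rs.foldl (stepAffine L) ab) := by
  induction rs with
  | nil => intro x ab h; simpa using h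
  | cons p t ih =>
    intro x ab h
    rw [List.foldl_cons, List.foldl_cons]
    exact ih (fun q hq => hinc q (List.mem_cons_of_mem p hq)) _ _
      (step_rel L i hL p (hinc p List.mem_cons_self) x ab h)

-- a fold over unrecognised steps only keeps ab = none
theorem fold_unrec (L : Int) (rs : List (String × Int))
    (h : ∀ p ∈ rs, p.1 ≠ "cut" ∧ p.1 ≠ "reverse" ∧ p.1 ≠ "inc") :
    rs.foldl (stepAffine L) none = none := by
  induction rs with
  | nil => rfl
  | cons p t ih =>
    obtain ⟨hc, hr, hi⟩ := h p List.mem_cons_self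
    rw [List.foldl_cons]
    have : stepAffine L none p = none := by simp [stepAffine, hc, hr, hi]
    rw [this]
    exact ih (fun q hq => h q (List.mem_cons_of_mem p hq))

-- someness is preserved by every step and created by a recognised step
theorem step_some (L : Int) (p : String × Int) (ab : Option (Int × Int)) (h : ab.isSome) :
    (stepAffine L ab p).isSome := by
  cases ab with
  | none => simp at h
  | some v =>
    simp only [stepAffine]
    split
    · simp
    · simp

theorem fold_some (L : Int) (rs : List (String × Int)) :
    ∀ (ab : Option (Int × Int)), ab.isSome → (rs.foldl (stepAffine L) ab).isSome := by
  induction rs with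
  | nil => intro ab h; simpa using h
  | cons p t ih =>
    intro ab h
    rw [List.foldl_cons]
    exact ih _ (step_some L p ab h)

theorem fold_rec_some (L : Int) (rs : List (String × Int)) :
    ∀ (ab : Option (Int × Int)), (∃ p ∈ rs, p.1 = "cut" ∨ p.1 = "reverse" ∨ p.1 = "inc") →
      (rs.foldl (stepAffine L) ab).isSome := by
  induction rs with
  | nil => intro ab h; simp at h
  | cons p t ih =>
    intro ab h
    rw [List.foldl_cons]
    by_cases hp : p.1 = "cut" ∨ p.1 = "reverse" ∨ p.1 = "inc"
    · refine fold_some L t _ ?_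
      rcases hp with hc | hr | hi
      · simp [stepAffine, hc]
      · simp [stepAffine, hr]
      · simp [stepAffine, hi]
    · obtain ⟨q, hq, hq2⟩ := h
      rcases List.mem_cons.mp hq with rfl | hqt
      · exact absurd hq2 hp
      · exact ih _ ⟨q, hqt, hq2⟩

-- A's accumulator never enters [0, lenth) over reverse/no-op steps if it did not start there
theorem foldA_stray (L : Int) (rs : List (String × Int)) : ∀ (x : Int),
    (∀ p ∈ rs, p.1 ≠ "cut" ∧ p.1 ≠ "inc") → ¬ (0 ≤ x ∧ x < L) →
    ¬ (0 ≤ rs.foldl (stepA L) x ∧ rs.foldl (stepA L) x < L) := by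
  induction rs with
  | nil => intro x _ hx; simpa using hx
  | cons p t ih =>
    intro x hno hx
    obtain ⟨hc, hi⟩ := hno p List.mem_cons_self
    have hnot : ∀ q ∈ t, q.1 ≠ "cut" ∧ q.1 ≠ "inc" := fun q hq => hno q (List.mem_cons_of_mem p hq)
    rw [List.foldl_cons]
    refine ih _ hnot ?_
    have hst : stepA L x p = (if p.1 = "reverse" then L - x - 1 else x) := by
      simp [stepA, hc, hi]
    rw [hst]
    split_ifs
    · omega
    · exact hx

-- ===== VERDICT (by name: the statement is the Claim_ definition above) =====
theorem get_card_spec : Claim_unchanged_get_card := by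
  intro interst lenth shuffle_steps _hdom hpre hnd
  obtain ⟨hL, hinc⟩ := hpre
  unfold get_card get_card_alt
  have hrel := fold_rel lenth interst shuffle_steps.reverse hL
    (fun p hp => hinc p (List.mem_reverse.mp hp)) interst none (by simp [RelAff])
  cases hB : shuffle_steps.reverse.foldl (stepAffine lenth) none with
  | none =>
    rw [hB] at hrel
    simpa [RelAff] using hrel
  | some ab =>
    rw [hB] at hrel
    simp only [RelAff] at hrel
    -- A's result is in range: interst starts in range, or some cut/inc occurs, or
    -- (no reverse at all) the some-result forces a recognised step, hence a cut/inc
    have hrange : (0 ≤ interst ∧ interst < lenth) ∨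
        ∃ p ∈ shuffle_steps, p.1 = "cut" ∨ p.1 = "inc" := by
      by_cases hin : 0 ≤ interst ∧ interst < lenth
      · exact Or.inl hin
      · right
        by_contra hno
        apply hnd
        refine ⟨hin, fun p hp =>
          ⟨fun hc => hno ⟨p, hp, Or.inl hc⟩, fun hi2 => hno ⟨p, hp, Or.inr hi2⟩⟩, ?_⟩
        -- no cut/inc; if additionally no reverse, the fold would still be none
        by_contra hnorev
        have hunrec : ∀ p ∈ shuffle_steps.reverse, p.1 ≠ "cut" ∧ p.1 ≠ "reverse" ∧ p.1 ≠ "inc" := by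
          intro p hp
          have hp' := List.mem_reverse.mp hp
          exact ⟨fun hc => hno ⟨p, hp', Or.inl hc⟩,
                 fun hr => hnorev ⟨p, hp', hr⟩,
                 fun hi2 => hno ⟨p, hp', Or.inr hi2⟩⟩
        rw [fold_unrec lenth _ hunrec] at hB
        simp at hB
    have hr := foldA_range lenth shuffle_steps.reverse hL interst
      (by rcases hrange with h | ⟨p, hp, hp2⟩
          · exact Or.inl h
          · exact Or.inr ⟨p, List.mem_reverse.mpr hp, hp2⟩)
    have heq := hrel
    rw [Int.ModEq] at heq
    rw [Int.emod_eq_of_lt hr.1 hr.2] at heq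
    show List.foldl (stepA lenth) interst shuffle_steps.reverse
        = PySem.Int.mod (ab.1 * interst + ab.2) lenth
    rw [PySem.Int.mod_eq_emod_of_pos hL]
    exact heq

theorem get_card_changed : Claim_changed_get_card := by
  unfold Claim_changed_get_card; decide

theorem get_card_tight : Claim_exact_get_card := by
  intro interst lenth shuffle_steps _hdom hpre hd heq
  obtain ⟨hL, _⟩ := hpre
  obtain ⟨hx, hno, p, hp, hprev⟩ := hd
  have hstray := foldA_stray lenth shuffle_steps.reverse interst
    (fun q hq => hno q (List.mem_reverse.mp hq)) hx
  have hsome : (shuffle_steps.reverse.foldl (stepAffine lenth) none).isSome :=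
    fold_rec_some lenth shuffle_steps.reverse none
      ⟨p, List.mem_reverse.mpr hp, Or.inr (Or.inl hprev)⟩
  unfold get_card get_card_alt at heq
  apply hstray
  rw [heq]
  cases hB : shuffle_steps.reverse.foldl (stepAffine lenth) none with
  | none => rw [hB] at hsome; simp at hsome
  | some ab =>
    exact ⟨PySem.Int.mod_nonneg _ hL, PySem.Int.mod_lt _ hL⟩
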